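-- pv_equiv track=rewrite | github.com/Dinesh73567/jobpilot | src/scraper/naukri.py | _notice_days_to_chip_label
-- ===== SOURCE A (Python) =====
-- def _notice_days_to_chip_label(days: int, chip_labels: list) -> str | None:
--     """Pick the best chip label for a given notice-period days value."""
--     if not chip_labels:
--         return None
--
--     # Priority mapping
--     if days <= 15:
--         targets = ["15 days or less", "immediate", "15 days", "less than 15"]
--     elif days <= 30:
--         targets = ["1 month", "30 days"]
--     elif days <= 60:
--         targets = ["2 months", "60 days", "1-2 months"]
--     elif days <= 90:
--         targets = ["3 months", "90 days", "2-3 months"]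
--     else:
--         targets = ["more than 3 months", "more than 90", "3+ months", "serving notice"]
--
--     labels_lower = [(lbl.lower(), lbl) for lbl in chip_labels]
--     for t in targets:
--         for lbl_lower, lbl_original in labels_lower:
--             if t in lbl_lower:
--                 return lbl_original
--     # Fallback: first chip
--     return chip_labels[0]
-- ===== SOURCE B (Python) =====
-- def _notice_days_to_chip_label(days: int, chip_labels: list) -> str | None:
--     """Pick the best chip label for a given notice-period days value."""
--     if not chip_labels:
--         return None
--
--     # Priority mapping (same as A)
--     if days <= 15:
--         targets = ["15 days or less", "immediate", "15 days", "less than 15"]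
--     elif days <= 30:
--         targets = ["1 month", "30 days"]
--     elif days <= 60:
--         targets = ["2 months", "60 days", "1-2 months"]
--     elif days <= 90:
--         targets = ["3 months", "90 days", "2-3 months"]
--     else:
--         targets = ["more than 3 months", "more than 90", "3+ months", "serving notice"]
--
--     # Single pass over the labels: keep the label with the globally smallest
--     # priority index; strict '<' makes the first label win ties, and the
--     # initial (chip_labels[0], len(targets)) pair is the no-match fallback.
--     best = chip_labels[0]
--     best_rank = len(targets)
--     for lbl in chip_labels:
--         low = lbl.lower()
--         rank = next((i for i, t in enumerate(targets) if t in low), len(targets))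
--         if rank < best_rank:
--             best, best_rank = lbl, rank
--     return best
-- ===== Notes on version B (the rewrite author's own statement) =====
-- stated objective: alternative
-- what changed: Replaces A's target-outer/label-inner return-on-first-hit double scan by a single fold over the labels that keeps the label with the smallest matching target index (strict '<' reproduces A's first-label tie-break; the initial (chip_labels[0], len(targets)) accumulator is the fallback).
import Mathlib
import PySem

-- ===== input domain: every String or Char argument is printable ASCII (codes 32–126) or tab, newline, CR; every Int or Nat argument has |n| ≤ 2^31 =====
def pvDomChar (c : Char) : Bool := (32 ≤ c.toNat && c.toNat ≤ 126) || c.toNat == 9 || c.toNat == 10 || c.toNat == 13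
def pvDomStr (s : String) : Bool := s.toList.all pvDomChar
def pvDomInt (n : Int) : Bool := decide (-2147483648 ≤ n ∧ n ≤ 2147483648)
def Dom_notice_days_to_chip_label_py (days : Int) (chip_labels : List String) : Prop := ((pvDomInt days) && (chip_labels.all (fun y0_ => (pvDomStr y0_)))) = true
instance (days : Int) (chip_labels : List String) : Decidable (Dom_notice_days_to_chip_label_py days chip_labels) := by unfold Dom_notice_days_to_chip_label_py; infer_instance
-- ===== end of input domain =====

-- B replaces A's target-outer/label-inner return-on-first-hit search by one fold over the
-- labels keeping the label with the smallest matching target index (alternative decomposition).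

-- the if/elif priority mapping, identical in both Pythons
def pvTargets (days : Int) : List String :=
  if days ≤ 15 then ["15 days or less", "immediate", "15 days", "less than 15"]
  else if days ≤ 30 then ["1 month", "30 days"]
  else if days ≤ 60 then ["2 months", "60 days", "1-2 months"]
  else if days ≤ 90 then ["3 months", "90 days", "2-3 months"]
  else ["more than 3 months", "more than 90", "3+ months", "serving notice"]

-- ===== PORT A =====
-- inner loop: first (lbl_lower, lbl_original) pair with t in lbl_lower
def pvAInner (t : String) : List (String × String) → Option String
  | [] => none
  | (lw, orig) :: rest => if PySem.Str.isIn t lw then some orig else pvAInner t rest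

-- outer loop over targets, return on first hit
def pvAOuter (pairs : List (String × String)) : List String → Option String
  | [] => none
  | t :: ts =>
    match pvAInner t pairs with
    | some r => some r
    | none => pvAOuter pairs ts

def notice_days_to_chip_label_py (days : Int) (chip_labels : List String) : Option String :=
  match chip_labels with
  | [] => none
  | first :: _ =>
    let targets := pvTargets days
    let labels_lower := chip_labels.map (fun lbl => (PySem.Str.lower lbl, lbl))
    match pvAOuter labels_lower targets with
    | some r => some r
    | none => some first              -- fallback: first chip

-- ===== PORT B =====
-- rank of a lowercased label: smallest target index that is a substring, else len(targets)
def pvRank (targets : List String) (low : String) : Nat :=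
  (targets.findIdx? (fun t => PySem.Str.isIn t low)).getD targets.length

-- single pass: keep (best, best_rank), strict '<' so the first label wins ties
def pvBFold (targets : List String) : List String → String → Nat → String
  | [], best, _ => best
  | lbl :: rest, best, bestRank =>
    let r := pvRank targets (PySem.Str.lower lbl)
    if r < bestRank then pvBFold targets rest lbl r else pvBFold targets rest best bestRank

def notice_days_to_chip_label_py_alt (days : Int) (chip_labels : List String) : Option String :=
  match chip_labels with
  | [] => none
  | first :: _ =>
    let targets := pvTargets days
    some (pvBFold targets chip_labels first targets.length)

-- ===== PRECONDITION & SPEC =====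
def Spec_notice_days_to_chip_label_py (days : Int) (chip_labels : List String) (out : Option String) : Prop := out = notice_days_to_chip_label_py_alt days chip_labels
instance (days : Int) (chip_labels : List String) (out : Option String) : Decidable (Spec_notice_days_to_chip_label_py days chip_labels out) := by unfold Spec_notice_days_to_chip_label_py; infer_instance

-- ===== CLAIM (what is proved, stated in full; the proofs are below) =====
def Claim_equal_notice_days_to_chip_label_py : Prop := ∀ (days : Int) (chip_labels : List String), Dom_notice_days_to_chip_label_py days chip_labels → Spec_notice_days_to_chip_label_py days chip_labels (notice_days_to_chip_label_py days chip_labels)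

-- ===== LEMMAS AND PROOFS =====

theorem pvRank_cons (t : String) (ts : List String) (lw : String) :
    pvRank (t :: ts) lw = if PySem.Str.isIn t lw then 0 else pvRank ts lw + 1 := by
  unfold pvRank
  rw [List.findIdx?_cons]
  split
  · simp_all
  · cases h : List.findIdx? (fun t => PySem.Str.isIn t lw) ts <;> simp_all

theorem pvRank_le (ts : List String) (lw : String) : pvRank ts lw ≤ ts.length := by
  induction ts with
  | nil => simp [pvRank]
  | cons t ts ih =>
    rw [pvRank_cons]
    split
    · simp
    · simp; omega

theorem pvRank_take (ts : List String) (lw : String) :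
    ∀ r : Nat, r ≤ ts.length → pvRank (ts.take r) lw = min (pvRank ts lw) r := by
  induction ts with
  | nil => intro r hr; simp at hr; simp [hr, pvRank]
  | cons t ts ih =>
    intro r hr
    cases r with
    | zero => simp [pvRank]
    | succ r =>
      simp only [List.take_succ_cons]
      rw [pvRank_cons, pvRank_cons]
      split
      · simp
      · rw [ih r (by simpa using hr)]
        omega

theorem pvAOuter_nil (ts : List String) : pvAOuter [] ts = none := by
  induction ts with
  | nil => rfl
  | cons t ts ih => simpa [pvAOuter, pvAInner] using ih

-- peeling the first (lw, l) pair off the pairs list of A's search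
theorem pvAOuter_cons_pair (lw l : String) (ps : List (String × String)) :
    ∀ ts : List String,
      pvAOuter ((lw, l) :: ps) ts =
        if pvRank ts lw < ts.length then
          some ((pvAOuter ps (ts.take (pvRank ts lw))).getD l)
        else pvAOuter ps ts := by
  intro ts
  induction ts with
  | nil => simp [pvAOuter]
  | cons t ts ih =>
    rw [pvAOuter]
    rw [show pvAInner t ((lw, l) :: ps) = if PySem.Str.isIn t lw then some l else pvAInner t ps from rfl]
    rw [pvRank_cons]
    by_cases hm : PySem.Str.isIn t lw
    · rw [if_pos hm, if_pos hm, if_pos (by simp)]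
      rfl
    · rw [if_neg hm, if_neg hm]
      cases hin : pvAInner t ps with
      | some x =>
        by_cases hlt : pvRank ts lw < ts.length
        · rw [if_pos (by simpa using hlt)]
          simp [List.take_succ_cons, pvAOuter, hin]
        · rw [if_neg (by simpa using hlt)]
          simp [pvAOuter, hin]
      | none =>
        rw [ih]
        by_cases hlt : pvRank ts lw < ts.length
        · rw [if_pos hlt, if_pos (by simpa using hlt)]
          simp [List.take_succ_cons, pvAOuter, hin]
        · rw [if_neg hlt, if_neg (by simpa using hlt)]
          simp [pvAOuter, hin]

-- B's fold computes A's search restricted to the first `r` targets, with fallback `best`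
theorem pvFold_eq_aOuter (ts : List String) :
    ∀ (labels : List String) (best : String) (r : Nat), r ≤ ts.length →
      pvBFold ts labels best r =
        (pvAOuter (labels.map (fun lbl => (PySem.Str.lower lbl, lbl))) (ts.take r)).getD best := by
  intro labels
  induction labels with
  | nil => intro best r _; simp [pvBFold, pvAOuter_nil]
  | cons lbl rest ih =>
    intro best r hr
    rw [pvBFold]
    simp only [List.map_cons]
    rw [pvAOuter_cons_pair]
    rw [pvRank_take ts _ r hr]
    have hlen : (ts.take r).length = r := by simp [List.length_take]; omega
    set rk := pvRank ts (PySem.Str.lower lbl) with hrk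
    by_cases hlt : rk < r
    · have hmin : min rk r = rk := by omega
      rw [hmin, hlen, if_pos hlt, if_pos hlt, List.take_take, hmin]
      simp only [Option.getD_some]
      exact ih lbl rk (pvRank_le ts _)
    · have hmin : min rk r = r := by omega
      rw [hmin, hlen, if_neg hlt, if_neg (lt_irrefl r)]
      exact ih best r hr

-- ===== VERDICT (by name: the statement is the Claim_ definition above) =====
theorem notice_days_to_chip_label_py_spec : Claim_equal_notice_days_to_chip_label_py := by
  intro days chip_labels _
  unfold Spec_notice_days_to_chip_label_py
  cases chip_labels with
  | nil => rfl
  | cons first rest =>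
    have hA : notice_days_to_chip_label_py days (first :: rest) =
        match pvAOuter ((first :: rest).map (fun lbl => (PySem.Str.lower lbl, lbl))) (pvTargets days) with
        | some r => some r
        | none => some first := rfl
    have hB : notice_days_to_chip_label_py_alt days (first :: rest) =
        some (pvBFold (pvTargets days) (first :: rest) first (pvTargets days).length) := rfl
    rw [hA, hB, pvFold_eq_aOuter (pvTargets days) (first :: rest) first (pvTargets days).length le_rfl,
       List.take_length]
    cases pvAOuter ((first :: rest).map (fun lbl => (PySem.Str.lower lbl, lbl))) (pvTargets days) <;> rfl
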